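-- pv_equiv track=rewrite | github.com/CastleRain/cos-pro | 1급 파이썬 문제 (1)/1급 파이썬 문제/2차/2차 1급 10_initial_code.py | solution
-- ===== SOURCE A (Python) =====
-- def solution(s):
--     answer = ""
--     save_text = ""
--     for i in s:
--         if i == "1":
--             if len(save_text) > 0:
--                 answer += save_text
--                 save_text = ""
--             answer += i
--
--         else:
--             if len(save_text) == 0:
--                 save_text += i
--
--     if len(save_text) != 0:
--         answer += save_text
--
--
--
--     return answer
-- ===== SOURCE B (Python) =====
-- def solution(s):
--     # run decomposition: split s into maximal runs of '1's / non-'1's,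
--     # keep '1'-runs whole, keep only the first char of each other run
--     runs = []
--     for c in s:
--         if runs and (runs[-1][0] == '1') == (c == '1'):
--             runs[-1] += c
--         else:
--             runs.append(c)
--     return ''.join(r if r[0] == '1' else r[0] for r in runs)
-- ===== Notes on version B (the rewrite author's own statement) =====
-- stated objective: alternative
-- what changed: B replaces A's stateful one-char save_text buffer with a run decomposition: it first splits the string into maximal runs of '1'/non-'1' characters, then emits each '1'-run whole and only the first character of each other run.
import Mathlib
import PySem

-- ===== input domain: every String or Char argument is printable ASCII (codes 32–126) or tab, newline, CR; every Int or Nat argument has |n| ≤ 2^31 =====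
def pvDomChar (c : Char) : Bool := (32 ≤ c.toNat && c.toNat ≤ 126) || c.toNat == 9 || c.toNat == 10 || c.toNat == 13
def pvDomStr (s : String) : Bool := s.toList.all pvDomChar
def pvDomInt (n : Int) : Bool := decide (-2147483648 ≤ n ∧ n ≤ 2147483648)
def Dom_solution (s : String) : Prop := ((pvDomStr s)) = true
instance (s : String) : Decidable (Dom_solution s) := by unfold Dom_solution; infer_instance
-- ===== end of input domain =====

-- B replaces A's stateful one-char save_text buffer with a run-partition-then-map traversal; alternative decomposition, same cost.

-- ===== PORT A =====
-- state: (answer, save_text), both as lists of chars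
def solutionStepA (p : List Char × List Char) (i : Char) : List Char × List Char :=
  if i == '1' then
    if p.2.length > 0 then (p.1 ++ p.2 ++ [i], []) else (p.1 ++ [i], p.2)
  else
    if p.2.length == 0 then (p.1, p.2 ++ [i]) else (p.1, p.2)

def solution (s : String) : String :=
  let st := s.toList.foldl solutionStepA ([], [])
  String.mk (if st.2.length ≠ 0 then st.1 ++ st.2 else st.1)

-- ===== PORT B =====
-- runs[-1][0] ported as headD ' ': every run built by the loop is nonempty, so exact
def solutionStepB (runs : List (List Char)) (c : Char) : List (List Char) :=
  match runs.getLast? with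
  | none => runs ++ [[c]]
  | some r =>
      if ((r.headD ' ' == '1') == (c == '1')) then runs.dropLast ++ [r ++ [c]]
      else runs ++ [[c]]

-- r if r[0]=='1' else r[0]
def solutionEmit (r : List Char) : List Char :=
  if r.headD ' ' == '1' then r else r.take 1

def solution_alt (s : String) : String :=
  String.mk ((s.toList.foldl solutionStepB []).flatMap solutionEmit)

-- ===== PRECONDITION & SPEC =====
def Spec_solution (s : String) (out : String) : Prop := out = solution_alt s
instance (s : String) (out : String) : Decidable (Spec_solution s out) := by unfold Spec_solution; infer_instance

-- ===== CLAIM (what is proved, stated in full; the proofs are below) =====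
def Claim_equal_solution : Prop := ∀ (s : String), Dom_solution s → Spec_solution s (solution s)

-- ===== LEMMAS AND PROOFS =====

-- Invariant linking A's (answer, save_text) with B's run list
def solutionInv (p : List Char × List Char) (runs : List (List Char)) : Prop :=
  (runs = [] ∧ p.1 = [] ∧ p.2 = []) ∨
  ∃ rs r, runs = rs ++ [r] ∧ r ≠ [] ∧
    (((r.headD ' ' == '1') = true ∧ p.2 = [] ∧ p.1 = (rs.flatMap solutionEmit) ++ r) ∨
     ((r.headD ' ' == '1') = false ∧ p.2 = r.take 1 ∧ p.1 = rs.flatMap solutionEmit))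


theorem solutionHeadT {r : List Char} (h : (r.headD ' ' == '1') = true) :
    r.head?.getD ' ' = '1' := by cases r <;> simpa using h

theorem solutionHeadF {r : List Char} (h : (r.headD ' ' == '1') = false) :
    ¬ r.head?.getD ' ' = '1' := by cases r <;> simpa using h

theorem solutionInv_step (p : List Char × List Char) (runs : List (List Char)) (c : Char)
    (h : solutionInv p runs) : solutionInv (solutionStepA p c) (solutionStepB runs c) := by
  obtain ⟨hr, h1, h2⟩ | ⟨rs, r, hr, hne, hcase⟩ := h
  · subst hr
    by_cases hc : c = '1'
    · subst hc
      refine Or.inr ⟨[], ['1'], by simp [solutionStepB], by simp, Or.inl ?_⟩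
      simp [solutionStepA, h1, h2]
    · refine Or.inr ⟨[], [c], by simp [solutionStepB], by simp, Or.inr ?_⟩
      have : (c == '1') = false := by simpa using hc
      simp [solutionStepA, this, h1, h2]
  · subst hr
    have hlast : (rs ++ [r]).getLast? = some r := by simp
    have hdrop : (rs ++ [r]).dropLast = rs := by simp
    by_cases hc : c = '1'
    · subst hc
      obtain ⟨hk, h2, h1⟩ | ⟨hk, h2, h1⟩ := hcase
      · -- '1'-run, c = '1': extend last run; A appends '1' to answer (save empty)
        refine Or.inr ⟨rs, r ++ ['1'], ?_, by simp, Or.inl ⟨?_, ?_, ?_⟩⟩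
        · simp [solutionStepB, hlast, hdrop, solutionHeadT hk]
        · cases r with
          | nil => exact absurd rfl hne
          | cons a t => simpa using hk
        · simp [solutionStepA, h2]
        · simp [solutionStepA, h1, h2]
      · -- non-'1'-run, c = '1': new run ['1']; A flushes save then appends '1'
        refine Or.inr ⟨rs ++ [r], ['1'], ?_, by simp, Or.inl ⟨by simp, ?_, ?_⟩⟩
        · simp [solutionStepB, hlast, hdrop, solutionHeadF hk]
        · have hs : p.2.length > 0 := by
            rw [h2]; cases r with
            | nil => exact absurd rfl hne
            | cons a t => simp
          simp [solutionStepA, hs]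
        · have hlen : 0 < r.length := by
            cases r with
            | nil => exact absurd rfl hne
            | cons a t => simp
          simp [solutionStepA, h1, h2, hlen, List.flatMap_append, solutionEmit,
            solutionHeadF hk]
    · have hcb : (c == '1') = false := by simpa using hc
      obtain ⟨hk, h2, h1⟩ | ⟨hk, h2, h1⟩ := hcase
      · -- '1'-run, c ≠ '1': new run [c]; A saves c (save was empty)
        refine Or.inr ⟨rs ++ [r], [c], ?_, by simp, Or.inr ⟨by simpa using hc, ?_, ?_⟩⟩
        · simp [solutionStepB, hlast, hdrop, hk, hcb, solutionHeadT hk]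
        · simp [solutionStepA, hcb, h2]
        · simp [solutionStepA, hcb, h2, h1, List.flatMap_append, solutionEmit,
            solutionHeadT hk]
      · -- non-'1'-run, c ≠ '1': extend last run; A leaves state unchanged (save nonempty)
        refine Or.inr ⟨rs, r ++ [c], ?_, by simp, Or.inr ⟨?_, ?_, ?_⟩⟩
        · simp [solutionStepB, hlast, hdrop, hk, hcb, solutionHeadF hk]
        · cases r with
          | nil => exact absurd rfl hne
          | cons a t => simpa using hk
        · have hs : (p.2.length == 0) = false := by
            rw [h2]; cases r with
            | nil => exact absurd rfl hne
            | cons a t => simp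
          cases r with
          | nil => exact absurd rfl hne
          | cons a t => simp [solutionStepA, hcb, hs, h2]
        · have hs : (p.2.length == 0) = false := by
            rw [h2]; cases r with
            | nil => exact absurd rfl hne
            | cons a t => simp
          simp [solutionStepA, hcb, hs, h1]

theorem solutionInv_foldl (l : List Char) (p : List Char × List Char) (runs : List (List Char))
    (h : solutionInv p runs) :
    solutionInv (l.foldl solutionStepA p) (l.foldl solutionStepB runs) := by
  induction l generalizing p runs with
  | nil => exact h
  | cons c t ih => exact ih _ _ (solutionInv_step p runs c h)

-- ===== VERDICT (by name: the statement is the Claim_ definition above) =====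
theorem solution_spec : Claim_equal_solution := by
  intro s _
  unfold Spec_solution solution solution_alt
  have h := solutionInv_foldl s.toList ([], []) [] (Or.inl ⟨rfl, rfl, rfl⟩)
  set p := s.toList.foldl solutionStepA ([], [])
  set runs := s.toList.foldl solutionStepB []
  obtain ⟨hr, h1, h2⟩ | ⟨rs, r, hr, hne, hcase⟩ := h
  · simp [hr, h1, h2]
  · obtain ⟨hk, h2, h1⟩ | ⟨hk, h2, h1⟩ := hcase
    · simp [hr, h1, h2, List.flatMap_append, solutionEmit, solutionHeadT hk]
    · have hs : p.2.length ≠ 0 := by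
        rw [h2]; cases r with
        | nil => exact absurd rfl hne
        | cons a t => simp
      have hlen : r ≠ [] := hne
      simp [hr, h1, h2, hs, hlen, List.flatMap_append, solutionEmit, solutionHeadF hk]
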